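-- pv_equiv track=rewrite | github.com/sgt1796/POP-AGENT | agent/tools/bash_exec_tool.py | _collect_positionals
-- ===== SOURCE A (Python) =====
-- from typing import Any, Awaitable, Callable, Dict, List, Optional, Sequence, Set, Tuple
--
-- def _collect_positionals(
--
--     tokens: Sequence[str],
--     short_value_flags: Optional[Set[str]] = None,
--     long_value_flags: Optional[Set[str]] = None,
-- ) -> List[str]:
--     short_flags = short_value_flags or set()
--     long_flags = long_value_flags or set()
--     result: List[str] = []
--     expect_value = False
--     force_positional = False
--
--     for token in tokens:
--         if expect_value:
--             expect_value = False
--             continue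
--         if force_positional:
--             result.append(token)
--             continue
--         if token == "--":
--             force_positional = True
--             continue
--         if token == "-":
--             result.append(token)
--             continue
--         if token.startswith("--"):
--             if "=" in token:
--                 continue
--             if token in long_flags:
--                 expect_value = True
--             continue
--         if token.startswith("-"):
--             if token in short_flags:
--                 expect_value = True
--             continue
--         result.append(token)
--     return result
-- ===== SOURCE B (Python) =====
-- def _classify(t, short_flags, long_flags):
--     """Pure per-token classification: 'sep', 'pos', 'val' (flag taking a value) or 'flag'."""
--     if t == "--":
--         return "sep"
--     if t == "-" or not t.startswith("-"):
--         return "pos"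
--     if t.startswith("--"):
--         return "val" if ("=" not in t and t in long_flags) else "flag"
--     return "val" if t in short_flags else "flag"
--
--
-- def _collect_positionals(tokens, short_value_flags=None, long_value_flags=None):
--     short_flags = short_value_flags or set()
--     long_flags = long_value_flags or set()
--     # pass 1: stateless classification of every token
--     kinds = [_classify(t, short_flags, long_flags) for t in tokens]
--     # pass 2: mark tokens consumed as a value flag's argument
--     skip = [False]
--     for k in kinds:
--         skip.append(k == "val" and not skip[-1])
--     # pass 3: locate the effective "--" separator (if any)
--     cut = next((j for j, (k, s) in enumerate(zip(kinds, skip)) if k == "sep" and not s),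
--                len(tokens))
--     # pass 4: positionals before the cut, everything after it verbatim
--     head = [t for t, k, s in zip(tokens[:cut], kinds, skip) if k == "pos" and not s]
--     return head + list(tokens[cut + 1:])
-- ===== Notes on version B (the rewrite author's own statement) =====
-- stated objective: alternative
-- what changed: Replaced A's single stateful scan (expect_value/force_positional booleans) by staged stateless passes: a per-token classification map, a consumption mask computed over the kinds, locating the effective '--' cut, and a final filter plus tail slice.
import Mathlib
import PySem

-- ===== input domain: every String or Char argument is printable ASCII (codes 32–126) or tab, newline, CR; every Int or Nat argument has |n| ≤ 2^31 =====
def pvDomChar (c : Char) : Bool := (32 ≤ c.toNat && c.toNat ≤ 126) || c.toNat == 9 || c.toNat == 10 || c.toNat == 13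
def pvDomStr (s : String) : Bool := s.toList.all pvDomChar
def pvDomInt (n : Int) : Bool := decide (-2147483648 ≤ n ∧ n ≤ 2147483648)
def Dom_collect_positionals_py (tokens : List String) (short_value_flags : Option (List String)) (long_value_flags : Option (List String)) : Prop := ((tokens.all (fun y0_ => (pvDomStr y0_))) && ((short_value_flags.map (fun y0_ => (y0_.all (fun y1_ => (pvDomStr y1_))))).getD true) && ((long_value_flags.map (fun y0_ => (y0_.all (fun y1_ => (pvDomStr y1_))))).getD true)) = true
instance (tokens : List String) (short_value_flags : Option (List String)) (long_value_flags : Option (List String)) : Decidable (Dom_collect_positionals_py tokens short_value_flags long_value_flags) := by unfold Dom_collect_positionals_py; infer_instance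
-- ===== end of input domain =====

-- B replaces A's single stateful scan by staged stateless passes (classify each token,
-- compute a consumption mask, locate the effective "--" cut, filter + tail slice); same cost.

-- ===== PORT A =====
-- A's for-loop as structural recursion carrying the same state (result, expect_value, force_positional)
def collectA (shorts longs : List String) (result : List String) (expect force : Bool) : List String → List String
  | [] => result
  | t :: rest =>
    if expect then collectA shorts longs result false force rest
    else if force then collectA shorts longs (result ++ [t]) expect force rest
    else if t = "--" then collectA shorts longs result expect true rest
    else if t = "-" then collectA shorts longs (result ++ [t]) expect force rest
    else if PySem.Str.startswith t "--" then
      (if PySem.Str.isIn "=" t then collectA shorts longs result expect force rest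
       else if longs.contains t then collectA shorts longs result true force rest
       else collectA shorts longs result expect force rest)
    else if PySem.Str.startswith t "-" then
      (if shorts.contains t then collectA shorts longs result true force rest
       else collectA shorts longs result expect force rest)
    else collectA shorts longs (result ++ [t]) expect force rest

def collect_positionals_py (tokens : List String) (short_value_flags : Option (List String)) (long_value_flags : Option (List String)) : List String :=
  collectA (short_value_flags.getD []) (long_value_flags.getD []) [] false false tokens

-- ===== PORT B =====
-- Source B's _classify: stateless per-token kind
def classifyTok (shorts longs : List String) (t : String) : String :=
  if t = "--" then "sep"
  else if t = "-" ∨ ¬ PySem.Str.startswith t "-" then "pos"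
  else if PySem.Str.startswith t "--" then
    (if ¬ PySem.Str.isIn "=" t ∧ longs.contains t then "val" else "flag")
  else (if shorts.contains t then "val" else "flag")

-- Source B's staged passes: kinds (map), skip (scanl over kinds), cut (first unskipped "sep";
-- findIdx over the zip returns its length = tokens.length when absent, matching the default),
-- head (filter of the zipped prefix), then the verbatim tail slice
def altCore (shorts longs : List String) (tokens : List String) : List String :=
  let kinds := tokens.map (classifyTok shorts longs)
  let skip := List.scanl (fun s k => k == "val" && !s) false kinds
  let cut := (kinds.zip skip).findIdx (fun p => p.1 == "sep" && !p.2)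
  let head := ((tokens.take cut).zip (kinds.zip skip)).filterMap
    (fun p => if p.2.1 == "pos" && !p.2.2 then some p.1 else none)
  head ++ tokens.drop (cut + 1)

def collect_positionals_py_alt (tokens : List String) (short_value_flags : Option (List String)) (long_value_flags : Option (List String)) : List String :=
  altCore (short_value_flags.getD []) (long_value_flags.getD []) tokens

-- ===== PRECONDITION & SPEC =====
def Spec_collect_positionals_py (tokens : List String) (short_value_flags : Option (List String)) (long_value_flags : Option (List String)) (out : List String) : Prop := out = collect_positionals_py_alt tokens short_value_flags long_value_flags
instance (tokens : List String) (short_value_flags : Option (List String)) (long_value_flags : Option (List String)) (out : List String) : Decidable (Spec_collect_positionals_py tokens short_value_flags long_value_flags out) := by unfold Spec_collect_positionals_py; infer_instance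

-- ===== CLAIM (what is proved, stated in full; the proofs are below) =====
def Claim_equal_collect_positionals_py : Prop := ∀ (tokens : List String) (short_value_flags : Option (List String)) (long_value_flags : Option (List String)), Dom_collect_positionals_py tokens short_value_flags long_value_flags → Spec_collect_positionals_py tokens short_value_flags long_value_flags (collect_positionals_py tokens short_value_flags long_value_flags)

-- ===== LEMMAS AND PROOFS =====

-- proof-side recursive characterisation of B's staged passes
def collectB (shorts longs : List String) : List String → List String
  | [] => []
  | t :: rest =>
    if t = "--" then rest
    else if t = "-" ∨ ¬ PySem.Str.startswith t "-" then t :: collectB shorts longs rest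
    else if PySem.Str.startswith t "--" then
      (if ¬ PySem.Str.isIn "=" t ∧ longs.contains t then collectB shorts longs (rest.drop 1)
       else collectB shorts longs rest)
    else
      (if shorts.contains t then collectB shorts longs (rest.drop 1)
       else collectB shorts longs rest)
termination_by l => l.length
decreasing_by all_goals simp

theorem altCore_sep (shorts longs : List String) (t : String) (rest : List String)
    (hk : classifyTok shorts longs t = "sep") :
    altCore shorts longs (t :: rest) = rest := by
  simp [altCore, hk, List.findIdx_cons]

theorem altCore_pos (shorts longs : List String) (t : String) (rest : List String)
    (hk : classifyTok shorts longs t = "pos") :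
    altCore shorts longs (t :: rest) = t :: altCore shorts longs rest := by
  simp [altCore, hk, List.findIdx_cons, List.scanl]

theorem altCore_flag (shorts longs : List String) (t : String) (rest : List String)
    (hk : classifyTok shorts longs t = "flag") :
    altCore shorts longs (t :: rest) = altCore shorts longs rest := by
  simp [altCore, hk, List.findIdx_cons, List.scanl]

theorem altCore_val (shorts longs : List String) (t : String) (rest : List String)
    (hk : classifyTok shorts longs t = "val") :
    altCore shorts longs (t :: rest) = altCore shorts longs (rest.drop 1) := by
  cases rest with
  | nil => simp [altCore, hk, List.findIdx_cons, List.scanl]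
  | cons t' rest' => simp [altCore, hk, List.findIdx_cons, List.scanl]


theorem altCore_eq_collectB (shorts longs : List String) (ts : List String) :
    altCore shorts longs ts = collectB shorts longs ts := by
  induction ts using collectB.induct (shorts := shorts) (longs := longs) with
  | case1 => simp [altCore, collectB]
  | case2 rest =>
    rw [altCore_sep shorts longs _ _ (by unfold classifyTok; rw [if_pos rfl]), collectB, if_pos rfl]
  | case3 t rest h1 h2 ih =>
    rw [altCore_pos shorts longs _ _ (by unfold classifyTok; rw [if_neg h1, if_pos h2]), ih,
        collectB, if_neg h1, if_pos h2]
  | case4 t rest h1 h2 h3 h4 ih =>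
    rw [altCore_val shorts longs _ _
          (by unfold classifyTok; rw [if_neg h1, if_neg h2, if_pos h3, if_pos h4]), ih,
        collectB, if_neg h1, if_neg h2, if_pos h3, if_pos h4]
  | case5 t rest h1 h2 h3 h4 ih =>
    rw [altCore_flag shorts longs _ _
          (by unfold classifyTok; rw [if_neg h1, if_neg h2, if_pos h3, if_neg h4]), ih,
        collectB, if_neg h1, if_neg h2, if_pos h3, if_neg h4]
  | case6 t rest h1 h2 h3 h4 ih =>
    rw [altCore_val shorts longs _ _
          (by unfold classifyTok; rw [if_neg h1, if_neg h2, if_neg h3, if_pos h4]), ih,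
        collectB, if_neg h1, if_neg h2, if_neg h3, if_pos h4]
  | case7 t rest h1 h2 h3 h4 ih =>
    rw [altCore_flag shorts longs _ _
          (by unfold classifyTok; rw [if_neg h1, if_neg h2, if_neg h3, if_neg h4]), ih,
        collectB, if_neg h1, if_neg h2, if_neg h3, if_neg h4]

-- once force_positional is set, A appends every remaining token
theorem collectA_force (shorts longs : List String) (ts : List String) : ∀ res, collectA shorts longs res false true ts = res ++ ts := by
  induction ts with
  | nil => intro res; simp [collectA]
  | cons t rest ih => intro res; simp [collectA, ih]

theorem chars_dash_of_ddash (l : List Char) (h : PySem.Chars.startswith l ['-', '-'] = true) : PySem.Chars.startswith l ['-'] = true := by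
  rw [PySem.Chars.startswith_iff] at *
  exact List.IsPrefix.trans (by decide) h

theorem collectA_eq_collectB (shorts longs : List String) (ts : List String) : ∀ res, collectA shorts longs res false false ts = res ++ collectB shorts longs ts := by
  induction ts using collectB.induct (shorts := shorts) (longs := longs) with
  | case1 => intro res; simp [collectA, collectB]
  | case2 rest =>
    intro res
    simp [collectA, collectB, collectA_force]
  | case3 t rest h1 h2 ih =>
    intro res
    rcases h2 with h2 | h2
    · subst h2
      simp [collectA, collectB, h1, ih]
    · simp only [PySem.Str.startswith_eq] at h2
      simp only [show ("-" : String).toList = ['-'] from rfl, show ("--" : String).toList = ['-', '-'] from rfl, show ("=" : String).toList = ['='] from rfl] at h2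
      simp only [Bool.not_eq_true] at h2
      have ht2 : t ≠ "-" := by
        intro he; subst he; exact absurd h2 (by decide)
      have hdd : PySem.Chars.startswith t.toList ['-', '-'] = false := by
        cases hc : PySem.Chars.startswith t.toList ['-', '-'] with
        | false => rfl
        | true => rw [chars_dash_of_ddash _ hc] at h2; exact absurd h2 (by simp)
      simp [collectA, collectB, h1, ht2, hdd, h2, ih]
  | case4 t rest h1 h2 h3 h4 ih =>
    intro res
    push_neg at h2
    obtain ⟨ht2, hd⟩ := h2
    simp only [PySem.Str.startswith_eq, PySem.Str.isIn_eq] at h3 h4 hd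
    simp only [show ("-" : String).toList = ['-'] from rfl, show ("--" : String).toList = ['-', '-'] from rfl, show ("=" : String).toList = ['='] from rfl] at h3 h4 hd
    rcases h4 with ⟨hne, hmem⟩
    have hmem' : t ∈ longs := by simpa using hmem
    cases rest with
    | nil =>
      simp [collectA, collectB, h1, ht2, h3, hd, hne, hmem']
    | cons t' rest' =>
      simp only [List.drop_succ_cons, List.drop_zero] at ih
      simp [collectA, collectB, h1, ht2, h3, hd, hne, hmem', ih]
  | case5 t rest h1 h2 h3 h4 ih =>
    intro res
    push_neg at h2
    obtain ⟨ht2, hd⟩ := h2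
    simp only [PySem.Str.startswith_eq, PySem.Str.isIn_eq] at h3 h4 hd
    simp only [show ("-" : String).toList = ['-'] from rfl, show ("--" : String).toList = ['-', '-'] from rfl, show ("=" : String).toList = ['='] from rfl] at h3 h4 hd
    by_cases he : PySem.Chars.isIn ['='] t.toList = true
    · simp [collectA, collectB, h1, ht2, h3, hd, he, ih]
    · simp only [Bool.not_eq_true] at he
      have hmem : longs.contains t = false := by
        cases hc : longs.contains t with
        | false => rfl
        | true => exact absurd ⟨by simp [he], hc⟩ h4
      have hmem' : t ∉ longs := by simpa using hmem
      simp [collectA, collectB, h1, ht2, h3, hd, he, hmem', ih]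
  | case6 t rest h1 h2 h3 h4 ih =>
    intro res
    push_neg at h2
    obtain ⟨ht2, hd⟩ := h2
    simp only [PySem.Str.startswith_eq] at h3 hd
    simp only [show ("-" : String).toList = ['-'] from rfl, show ("--" : String).toList = ['-', '-'] from rfl, show ("=" : String).toList = ['='] from rfl] at h3 hd
    simp only [Bool.not_eq_true] at h3
    have h4' : t ∈ shorts := by simpa using h4
    cases rest with
    | nil =>
      simp [collectA, collectB, h1, ht2, h3, hd, h4']
    | cons t' rest' =>
      simp only [List.drop_succ_cons, List.drop_zero] at ih
      simp [collectA, collectB, h1, ht2, h3, hd, h4', ih]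
  | case7 t rest h1 h2 h3 h4 ih =>
    intro res
    push_neg at h2
    obtain ⟨ht2, hd⟩ := h2
    simp only [PySem.Str.startswith_eq] at h3 hd
    simp only [show ("-" : String).toList = ['-'] from rfl, show ("--" : String).toList = ['-', '-'] from rfl, show ("=" : String).toList = ['='] from rfl] at h3 hd
    simp only [Bool.not_eq_true] at h3 h4
    have h4' : t ∉ shorts := by simpa using h4
    simp [collectA, collectB, h1, ht2, h3, hd, h4', ih]

-- ===== VERDICT (by name: the statement is the Claim_ definition above) =====
theorem collect_positionals_py_spec : Claim_equal_collect_positionals_py := by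
  intro tokens s l _
  unfold Spec_collect_positionals_py collect_positionals_py collect_positionals_py_alt
  rw [altCore_eq_collectB]
  simpa using collectA_eq_collectB (s.getD []) (l.getD []) tokens []
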